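-- pv_equiv track=rewrite | github.com/Ericsson/PlantUML-Interactive-Editor | src/plantuml_gui/title.py | find_title_bounds
-- ===== SOURCE A (Python) =====
-- def find_title_bounds(lines):
--     start, end = -1, -1
--     for index, line in enumerate(lines):
--         if line.startswith("title"):
--             start = index
--         if line.startswith("endtitle") or line.startswith("end title"):
--             end = index
--     return start, end
-- ===== SOURCE B (Python) =====
-- def find_title_bounds(lines):
--     start, end = -1, -1
--     found_start = found_end = False
--     for index, line in reversed(list(enumerate(lines))):
--         if not found_start and line.startswith("title"):
--             start, found_start = index, True
--         if not found_end and (line.startswith("endtitle") or line.startswith("end title")):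
--             end, found_end = index, True
--         if found_start and found_end:
--             break
--     return start, end
-- ===== Notes on version B (the rewrite author's own statement) =====
-- stated objective: alternative
-- what changed: B scans the lines in reverse with found_start/found_end flags and breaks as soon as both last occurrences are located, instead of A's full forward pass that keeps overwriting start/end.
import Mathlib
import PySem

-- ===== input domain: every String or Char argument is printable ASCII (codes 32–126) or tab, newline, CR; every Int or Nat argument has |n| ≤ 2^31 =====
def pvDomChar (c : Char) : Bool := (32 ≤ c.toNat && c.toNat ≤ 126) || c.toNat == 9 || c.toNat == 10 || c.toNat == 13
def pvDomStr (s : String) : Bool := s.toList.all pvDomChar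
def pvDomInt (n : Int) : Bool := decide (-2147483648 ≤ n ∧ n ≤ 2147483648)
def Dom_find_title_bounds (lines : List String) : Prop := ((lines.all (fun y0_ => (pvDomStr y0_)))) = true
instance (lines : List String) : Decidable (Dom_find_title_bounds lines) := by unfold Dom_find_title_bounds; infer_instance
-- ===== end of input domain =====

-- B replaces A's full forward overwrite pass by a reverse scan with found-flags and an
-- early break once both last occurrences are located (objective: alternative, same results).

-- ===== PORT A =====
-- forward pass: for index, line in enumerate(lines): overwrite start/end on each match
def find_title_bounds (lines : List String) : Int × Int :=
  (PySem.List.enumerate lines).foldl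
    (fun se p =>
      let start := if PySem.Str.startswith p.2 "title" then p.1 else se.1
      let end_ := if PySem.Str.startswith p.2 "endtitle" || PySem.Str.startswith p.2 "end title" then p.1 else se.2
      (start, end_))
    (-1, -1)

-- ===== PORT B =====
-- reverse loop body of Source B: flags found_start/found_end, record first (reverse-order) match, break when both found
def pvTitleLoopB : List (Int × String) → Int → Int → Bool → Bool → Int × Int
  | [], start, end_, _, _ => (start, end_)
  | (index, line) :: rest, start, end_, found_start, found_end =>
    let sp := if !found_start && PySem.Str.startswith line "title" then (index, true) else (start, found_start)
    let ep := if !found_end && (PySem.Str.startswith line "endtitle" || PySem.Str.startswith line "end title") then (index, true) else (end_, found_end)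
    if sp.2 && ep.2 then (sp.1, ep.1) else pvTitleLoopB rest sp.1 ep.1 sp.2 ep.2

def find_title_bounds_alt (lines : List String) : Int × Int :=
  pvTitleLoopB (PySem.List.enumerate lines).reverse (-1) (-1) false false

-- ===== PRECONDITION & SPEC =====
def Spec_find_title_bounds (lines : List String) (out : Int × Int) : Prop := out = find_title_bounds_alt lines
instance (lines : List String) (out : Int × Int) : Decidable (Spec_find_title_bounds lines out) := by unfold Spec_find_title_bounds; infer_instance

-- ===== CLAIM (what is proved, stated in full; the proofs are below) =====
def Claim_equal_find_title_bounds : Prop := ∀ (lines : List String), Dom_find_title_bounds lines → Spec_find_title_bounds lines (find_title_bounds lines)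

-- ===== LEMMAS AND PROOFS =====

-- index of the first pair whose line satisfies p, default d
def pvFirst (p : String → Bool) : List (Int × String) → Int → Int
  | [], d => d
  | (i, line) :: rest, d => if p line then i else pvFirst p rest d

def pvIsTitle (l : String) : Bool := PySem.Str.startswith l "title"
def pvIsEnd (l : String) : Bool := PySem.Str.startswith l "endtitle" || PySem.Str.startswith l "end title"

theorem pvTitleLoopB_eq (l : List (Int × String)) : ∀ (s e : Int) (fs fe : Bool),
    pvTitleLoopB l s e fs fe =
      ((if fs then s else pvFirst pvIsTitle l s), (if fe then e else pvFirst pvIsEnd l e)) := by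
  induction l with
  | nil => intro s e fs fe; simp [pvTitleLoopB, pvFirst]
  | cons hd tl ih =>
    intro s e fs fe
    obtain ⟨i, line⟩ := hd
    cases ht : PySem.Str.startswith line "title" <;>
    cases he : (PySem.Str.startswith line "endtitle" || PySem.Str.startswith line "end title") <;>
    cases fs <;> cases fe <;>
      simp only [pvTitleLoopB, pvFirst, pvIsTitle, pvIsEnd, ht, he, ih, Bool.not_true,
        Bool.not_false, Bool.and_true, Bool.and_false, Bool.and_self,
        Bool.false_eq_true, if_true, if_false]

theorem pvFirst_append_singleton (p : String → Bool) (l : List (Int × String)) :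
    ∀ (i : Int) (line : String) (d : Int),
      pvFirst p (l ++ [(i, line)]) d = pvFirst p l (if p line then i else d) := by
  induction l with
  | nil => intro i line d; simp [pvFirst]
  | cons hd tl ih =>
    intro i line d
    obtain ⟨j, s⟩ := hd
    simp [pvFirst, ih]

theorem pvFold_eq (ps : List (Int × String)) : ∀ (s e : Int),
    ps.foldl
      (fun se p =>
        let start := if PySem.Str.startswith p.2 "title" then p.1 else se.1
        let end_ := if PySem.Str.startswith p.2 "endtitle" || PySem.Str.startswith p.2 "end title" then p.1 else se.2
        (start, end_))
      (s, e) =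
    ((pvFirst pvIsTitle ps.reverse s), (pvFirst pvIsEnd ps.reverse e)) := by
  induction ps with
  | nil => intro s e; simp [pvFirst]
  | cons hd tl ih =>
    intro s e
    obtain ⟨i, line⟩ := hd
    simp only [List.foldl_cons, List.reverse_cons]
    rw [ih, pvFirst_append_singleton, pvFirst_append_singleton]
    rfl

-- ===== VERDICT (by name: the statement is the Claim_ definition above) =====
theorem find_title_bounds_spec : Claim_equal_find_title_bounds := by
  intro lines _
  unfold Spec_find_title_bounds find_title_bounds find_title_bounds_alt
  rw [pvFold_eq, pvTitleLoopB_eq]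
  simp
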